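-- pv_equiv track=rewrite | github.com/ZackPaz2023/CapstoneGroup | ValidateNewData.py | valid_zip_code
-- ===== SOURCE A (Python) =====
-- def valid_zip_code(zipCode):
--     has_dash = False
--     for char in zipCode:
--         ascii_code = ord(char)
--         if ((48 <= ascii_code <= 57) or ascii_code == 45) == False:
--             return False
--         if (ascii_code == 45):
--             has_dash = True
--
--     if (has_dash):
--         zipCode = zipCode.split('-')
--         if (len(zipCode[0]) != 5 or len(zipCode[1]) != 4 or len(zipCode) != 2):
--             return False
--     else:
--         if (len(zipCode) != 5):
--             return False
--
--     return True
-- ===== SOURCE B (Python) =====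
-- def valid_zip_code(zipCode):
--     parts = zipCode.split('-')
--     if len(parts) == 1:
--         return len(parts[0]) == 5 and parts[0].isdigit()
--     if len(parts) == 2:
--         return (len(parts[0]) == 5 and parts[0].isdigit()
--                 and len(parts[1]) == 4 and parts[1].isdigit())
--     return False
-- ===== Notes on version B (the rewrite author's own statement) =====
-- stated objective: idiomatic
-- what changed: Replaced the per-character ord scan with dash-flag plus post-hoc length checks by a single split on the dash followed by part-count / length / isdigit checks on the parts.
import Mathlib
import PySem

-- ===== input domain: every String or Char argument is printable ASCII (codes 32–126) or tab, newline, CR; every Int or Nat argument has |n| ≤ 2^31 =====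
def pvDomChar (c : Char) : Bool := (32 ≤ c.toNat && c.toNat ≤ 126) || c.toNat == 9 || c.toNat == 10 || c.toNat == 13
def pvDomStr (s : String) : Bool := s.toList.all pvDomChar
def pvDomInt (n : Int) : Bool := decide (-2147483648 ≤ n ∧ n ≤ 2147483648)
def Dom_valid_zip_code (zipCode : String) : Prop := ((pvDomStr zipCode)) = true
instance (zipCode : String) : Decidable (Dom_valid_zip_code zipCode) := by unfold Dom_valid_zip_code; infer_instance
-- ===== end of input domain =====

-- B validates by splitting on the dash and checking the parts, instead of A's per-character scan: idiomatic, same cost.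

-- ===== PORT A =====
-- the code after the for-loop: length checks, splitting when a dash was seen
def vzcFinish (cs : List Char) (hasDash : Bool) : Bool :=
  if hasDash then
    match PySem.Chars.splitOn cs ['-'] with
    | p0 :: p1 :: rest =>
        if decide (p0.length ≠ 5) || decide (p1.length ≠ 4) || decide ((p0 :: p1 :: rest).length ≠ 2)
        then false else true
    | _ => false  -- unreachable: a dash was seen, so the split yields at least two parts
  else
    if decide (cs.length ≠ 5) then false else true

-- the for-loop: early return False on a non digit/dash character, tracking has_dash
def vzcScan (orig : List Char) : List Char → Bool → Bool
  | [], hasDash => vzcFinish orig hasDash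
  | c :: rest, hasDash =>
      let asciiCode := c.toNat
      if ((decide (48 ≤ asciiCode) && decide (asciiCode ≤ 57)) || decide (asciiCode = 45)) = false
      then false
      else vzcScan orig rest (if asciiCode = 45 then true else hasDash)

def valid_zip_code (zipCode : String) : Bool := vzcScan zipCode.toList zipCode.toList false

-- ===== PORT B =====
def valid_zip_code_alt (zipCode : String) : Bool :=
  match PySem.Chars.splitOn zipCode.toList ['-'] with
  | [p0] => decide (p0.length = 5) && PySem.Chars.strIsdigit p0
  | [p0, p1] => decide (p0.length = 5) && PySem.Chars.strIsdigit p0 &&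
                (decide (p1.length = 4) && PySem.Chars.strIsdigit p1)
  | _ => false

-- ===== PRECONDITION & SPEC =====
def Spec_valid_zip_code (zipCode : String) (out : Bool) : Prop := out = valid_zip_code_alt zipCode
instance (zipCode : String) (out : Bool) : Decidable (Spec_valid_zip_code zipCode out) := by unfold Spec_valid_zip_code; infer_instance

-- ===== CLAIM (what is proved, stated in full; the proofs are below) =====
def Claim_equal_valid_zip_code : Prop := ∀ (zipCode : String), Dom_valid_zip_code zipCode → Spec_valid_zip_code zipCode (valid_zip_code zipCode)

-- ===== LEMMAS AND PROOFS =====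

-- structural model of splitting on the single dash separator
def vzPrep (p : List Char) : List (List Char) → List (List Char)
  | [] => [p]
  | x :: xs => (p ++ x) :: xs

def vzSplit1 : List Char → List (List Char)
  | [] => [[]]
  | c :: rest => if c = '-' then [] :: vzSplit1 rest else vzPrep [c] (vzSplit1 rest)

lemma vzSplit1_ne_nil (cs : List Char) : vzSplit1 cs ≠ [] := by
  cases cs with
  | nil => simp [vzSplit1]
  | cons c rest =>
    simp only [vzSplit1]
    split
    · simp
    · cases h : vzSplit1 rest <;> simp [vzPrep]

lemma vzGo_eq (l : List Char) : ∀ (fuel : Nat) (cur : List Char) (acc : List (List Char)),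
    l.length ≤ fuel →
    PySem.Chars.splitOn.go ['-'] fuel l cur acc = acc.reverse ++ vzPrep cur.reverse (vzSplit1 l) := by
  induction l with
  | nil =>
    intro fuel cur acc _
    cases fuel <;> simp [PySem.Chars.splitOn.go, vzSplit1, vzPrep]
  | cons c rest ih =>
    intro fuel cur acc hf
    cases fuel with
    | zero => simp at hf
    | succ f =>
      by_cases hc : c = '-'
      · subst hc
        have hpre : List.isPrefixOf ['-'] ('-' :: rest) = true := by simp [List.isPrefixOf]
        simp only [PySem.Chars.splitOn.go, hpre, if_pos]
        rw [show List.drop (['-'] : List Char).length ('-' :: rest) = rest from rfl,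
          ih f [] (cur.reverse :: acc) (by simpa using Nat.le_of_succ_le_succ hf)]
        cases h : vzSplit1 rest with
        | nil => exact absurd h (vzSplit1_ne_nil rest)
        | cons x xs => simp [vzSplit1, vzPrep, h]
      · have hpre : List.isPrefixOf ['-'] (c :: rest) = false := by
          simp [List.isPrefixOf, Ne.symm hc]
        simp only [PySem.Chars.splitOn.go, hpre]
        rw [if_neg (by simp), ih f (c :: cur) acc (by simpa using Nat.le_of_succ_le_succ hf)]
        cases h : vzSplit1 rest with
        | nil => exact absurd h (vzSplit1_ne_nil rest)
        | cons x xs => simp [vzSplit1, vzPrep, h, hc]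

lemma splitOn_eq_vzSplit1 (cs : List Char) : PySem.Chars.splitOn cs ['-'] = vzSplit1 cs := by
  rw [PySem.Chars.splitOn, vzGo_eq cs (cs.length + 1) [] [] (Nat.le_succ _)]
  cases h : vzSplit1 cs with
  | nil => exact absurd h (vzSplit1_ne_nil cs)
  | cons x xs => simp [vzPrep]

-- the character test of A's loop is isdigit-or-dash
def vzDD (c : Char) : Bool := PySem.Chars.isdigit c || decide (c = '-')

lemma vzDD_eq (c : Char) :
    ((decide (48 ≤ c.toNat) && decide (c.toNat ≤ 57)) || decide (c.toNat = 45)) = vzDD c := by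
  have h1 : (48 ≤ c.toNat) ↔ ('0' ≤ c) := by
    rw [Char.le_def, UInt32.le_iff_toNat_le]; exact Iff.rfl
  have h2 : (c.toNat ≤ 57) ↔ (c ≤ '9') := by
    rw [Char.le_def, UInt32.le_iff_toNat_le]; exact Iff.rfl
  have h3 : (c.toNat = 45) ↔ (c = '-') := by
    constructor
    · intro hh
      have hof := Char.ofNat_toNat c
      rw [hh] at hof
      exact hof.symm
    · intro hh; subst hh; rfl
  unfold vzDD PySem.Chars.isdigit
  rw [decide_eq_decide.mpr h1, decide_eq_decide.mpr h2, decide_eq_decide.mpr h3]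

lemma vzScan_eq (orig : List Char) : ∀ (cs : List Char) (hd : Bool),
    vzcScan orig cs hd =
    if cs.all vzDD then vzcFinish orig (hd || cs.any (fun c => decide (c = '-'))) else false := by
  intro cs
  induction cs with
  | nil => intro hd; simp [vzcScan]
  | cons c rest ih =>
    intro hd
    simp only [vzcScan, vzDD_eq]
    by_cases h : vzDD c = true
    · rw [if_neg (by simp [h]), ih]
      have h45 : (c.toNat = 45) ↔ (c = '-') := by
        constructor
        · intro hh
          have hof := Char.ofNat_toNat c
          rw [hh] at hof
          exact hof.symm
        · intro hh; subst hh; rfl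
      by_cases hc : c = '-'
      · subst hc
        have hdd : vzDD '-' = true := by decide
        simp [List.all_cons, hdd]
      · have hne : c.toNat ≠ 45 := fun hh => hc (h45.mp hh)
        simp [List.all_cons, h, hc, hne]
    · simp only [Bool.not_eq_true] at h
      rw [if_pos (by simp [h])]
      have hall : (c :: rest).all vzDD = false := by simp [List.all_cons, h]
      rw [hall]
      simp

lemma vzAll_split1 (cs : List Char) :
    cs.all vzDD = (vzSplit1 cs).all (fun p => p.all PySem.Chars.isdigit) := by
  induction cs with
  | nil => simp [vzSplit1]
  | cons c rest ih =>
    by_cases hc : c = '-'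
    · subst hc
      simp [vzSplit1, List.all_cons, vzDD, ih]
    · simp only [vzSplit1, if_neg hc]
      cases h : vzSplit1 rest with
      | nil => exact absurd h (vzSplit1_ne_nil rest)
      | cons x xs =>
        rw [h] at ih
        simp [vzPrep, List.all_cons, vzDD, hc, ih, Bool.and_assoc]

lemma vzNoDash_split1 (cs : List Char) (h : cs.any (fun c => decide (c = '-')) = false) :
    vzSplit1 cs = [cs] := by
  induction cs with
  | nil => simp [vzSplit1]
  | cons c rest ih =>
    simp only [List.any_cons, Bool.or_eq_false_iff, decide_eq_false_iff_not] at h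
    simp [vzSplit1, h.1, ih h.2, vzPrep]

lemma vzDash_split1 (cs : List Char) (h : cs.any (fun c => decide (c = '-')) = true) :
    2 ≤ (vzSplit1 cs).length := by
  induction cs with
  | nil => simp at h
  | cons c rest ih =>
    by_cases hc : c = '-'
    · subst hc
      have := vzSplit1_ne_nil rest
      simp only [vzSplit1]
      cases hh : vzSplit1 rest with
      | nil => exact absurd hh this
      | cons x xs => simp
    · simp only [List.any_cons, decide_eq_true_eq, Bool.or_eq_true] at h
      rcases h with h | h
      · exact absurd h hc
      · have := ih h
        simp only [vzSplit1, if_neg hc]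
        cases hh : vzSplit1 rest with
        | nil => exact absurd hh (vzSplit1_ne_nil rest)
        | cons x xs =>
          rw [hh] at this
          simpa [vzPrep] using this

lemma vzDecideAll (l : List Char) (f : Char → Bool) :
    decide (∀ x ∈ l, f x = true) = l.all f := by
  rw [decide_eq_decide.mpr (List.all_eq_true (l := l) (p := f)).symm, Bool.decide_coe]

-- ===== VERDICT (by name: the statement is the Claim_ definition above) =====
theorem valid_zip_code_spec : Claim_equal_valid_zip_code := by
  intro zipCode _
  unfold Spec_valid_zip_code valid_zip_code valid_zip_code_alt
  rw [vzScan_eq, splitOn_eq_vzSplit1, vzAll_split1]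
  by_cases hd : (zipCode.toList.any fun c => decide (c = '-')) = true
  · have h2 := vzDash_split1 zipCode.toList hd
    unfold vzcFinish
    rw [splitOn_eq_vzSplit1]
    cases h : vzSplit1 zipCode.toList with
    | nil => exact absurd h (vzSplit1_ne_nil zipCode.toList)
    | cons p0 tl =>
      cases tl with
      | nil => rw [h] at h2; simp at h2
      | cons p1 rest =>
        cases rest with
        | nil =>
          simp only [hd, Bool.false_or, if_pos, List.all_cons, List.all_nil, List.length_cons,
            List.length_nil, Bool.and_true]
          by_cases h0 : p0.length = 5
          · by_cases h1 : p1.length = 4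
            · have e0 : p0.isEmpty = false := by
                cases p0 with
                | nil => simp at h0
                | cons a b => simp
              have e1 : p1.isEmpty = false := by
                cases p1 with
                | nil => simp at h1
                | cons a b => simp
              simp [PySem.Chars.strIsdigit, h0, h1, e0, e1, vzDecideAll]
            · simp [h0, h1]
          · simp [h0]
        | cons p2 rest2 =>
          simp [hd]
  · simp only [Bool.not_eq_true] at hd
    rw [vzNoDash_split1 zipCode.toList hd]
    unfold vzcFinish
    simp only [hd, Bool.or_false, Bool.false_eq_true, if_false, List.all_cons, List.all_nil,
      Bool.and_true]
    by_cases h5 : zipCode.toList.length = 5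
    · have h5' : zipCode.length = 5 := by rw [← String.length_toList]; exact h5
      have e0 : zipCode.toList.isEmpty = false := by
        cases hcs : zipCode.toList with
        | nil => rw [hcs] at h5; simp at h5
        | cons a b => simp
      simp [PySem.Chars.strIsdigit, h5', e0, vzDecideAll]
    · have h5' : ¬ zipCode.length = 5 := by rw [← String.length_toList]; exact h5
      simp [h5']
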